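-- pv_equiv track=rewrite | github.com/flavjoxhelollari/CS310-Algorithms | greedy_coins.py | make_amount
-- ===== SOURCE A (Python) =====
-- def make_amount(a, d, q):
-- 	total_coins = 0
-- 	index = len(d) - 1
-- 	while(a > 0):
-- 		while(a >= d[index]):
-- 			q[index] = q[index] + 1
-- 			a = a - d[index]
-- 			total_coins += 1
-- 		index -= 1
-- 	return total_coins
-- ===== SOURCE B (Python) =====
-- def make_amount(a, d, q):
-- 	total_coins = 0
-- 	for i in range(len(d) - 1, -1, -1):
-- 		if a <= 0:
-- 			break
-- 		n = a // d[i]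
-- 		if n:
-- 			q[i] += n
-- 			a -= n * d[i]
-- 			total_coins += n
-- 	return total_coins
-- ===== Notes on version B (the rewrite author's own statement) =====
-- stated objective: faster
-- what changed: Replaces the nested while-loops doing one-coin-at-a-time subtraction by a single for-loop over denominations from the top that takes each denomination's whole count by integer division; intended as asymptotically faster (measured: A timed out at n=16 where B returned, too fast on smaller sizes for a ratio).
import Mathlib
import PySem

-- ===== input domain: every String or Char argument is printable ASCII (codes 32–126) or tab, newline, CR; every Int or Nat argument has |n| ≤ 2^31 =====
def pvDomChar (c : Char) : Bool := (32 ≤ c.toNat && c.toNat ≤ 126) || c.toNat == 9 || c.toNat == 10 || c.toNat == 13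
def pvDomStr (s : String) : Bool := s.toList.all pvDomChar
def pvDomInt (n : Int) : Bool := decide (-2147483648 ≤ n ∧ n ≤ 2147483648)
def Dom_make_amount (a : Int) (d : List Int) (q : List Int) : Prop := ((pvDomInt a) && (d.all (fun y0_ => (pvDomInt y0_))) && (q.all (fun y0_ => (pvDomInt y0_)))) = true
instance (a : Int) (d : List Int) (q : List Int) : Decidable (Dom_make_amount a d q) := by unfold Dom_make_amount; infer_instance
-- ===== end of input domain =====

-- B replaces A's one-coin-at-a-time nested subtraction loops by one integer division per
-- denomination (objective: faster; intended as asymptotically faster — a timing run saw A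
-- time out at n=16 where B returned but could not measure a ratio). A also mutates its argument
-- q in place (B performs the equivalent q updates); the equivalence proved here is about the
-- RETURN value only.

-- ===== PORT A =====
-- inner 'while a >= d[index]' loop; fuel makes the Lean function total (A can diverge on a
-- non-positive denomination, outside Pre_); the fuel passed below is exact on Pre_ inputs.
-- The 'q[index] += 1' update is not threaded: A's return value never reads q.
def aInner (fuel : Nat) (a : Int) (di : Int) (total : Int) : Int × Int :=
  match fuel with
  | 0 => (a, total)
  | f + 1 => if di ≤ a then aInner f (a - di) di (total + 1) else (a, total)

-- outer 'while a > 0' loop; d[index] via pyGet? (Python negative-index semantics; none =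
-- IndexError, a value the claim never reaches since Pre_ excludes those inputs).
def aOuter (fuel : Nat) (a : Int) (d : List Int) (index : Int) (total : Int) : Int :=
  match fuel with
  | 0 => total
  | f + 1 =>
    if 0 < a then
      match PySem.List.pyGet? d index with
      | none => total
      | some di =>
        let p := aInner (a.toNat + 1) a di total
        aOuter f p.1 d (index - 1) p.2
    else total

def make_amount (a : Int) (d : List Int) (q : List Int) : Int :=
  aOuter (d.length + 1) a d ((d.length : Int) - 1) 0

-- ===== PORT B =====
-- B's for-loop runs i = len(d)-1 .. 0 (i.e. over d reversed) with an early break at a ≤ 0;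
-- the 'if n: q[i] += n' update is not threaded, since the return value never reads q.
def bGo (ds : List Int) (a : Int) (total : Int) : Int :=
  match ds with
  | [] => total
  | di :: rest =>
    if a ≤ 0 then total
    else
      let n := PySem.Int.floordiv a di
      if n = 0 then bGo rest a total
      else bGo rest (a - n * di) (total + n)

def make_amount_alt (a : Int) (d : List Int) (q : List Int) : Int :=
  bGo d.reverse a 0

-- ===== PRECONDITION & SPEC =====
-- the running remainder of the greedy pass: ds is the list of denominations already
-- processed, in processing order (top index first)
def gRem (a : Int) (ds : List Int) : Int := ds.foldl (fun r di => r % di) a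

-- Pre_ holds exactly on the inputs where the Python A returns normally: either a ≤ 0 (A
-- returns 0 at once), or the greedy pass from the top reaches remainder 0 at some index ≥ k
-- with every denomination it visits positive (a visited denomination ≤ 0 makes A loop
-- forever; a remainder still positive after index 0 makes A wrap around and raise
-- IndexError on d), and every index that receives a coin is within q (otherwise A raises
-- IndexError on q).
def Pre_make_amount (a : Int) (d : List Int) (q : List Int) : Prop :=
  a ≤ 0 ∨ (0 < a ∧ ∃ k, k < d.length ∧
    (∀ j, j < d.length → k ≤ j → 0 < d[j]!) ∧
    gRem a ((d.drop k).reverse) = 0 ∧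
    (∀ j, j < d.length → k ≤ j → d[j]! ≤ gRem a ((d.drop (j + 1)).reverse) → j < q.length))
instance (a : Int) (d : List Int) (q : List Int) : Decidable (Pre_make_amount a d q) := by
  unfold Pre_make_amount; infer_instance

def pvWitness_make_amount : Int × List Int × List Int := (63, [1, 5, 10, 25], [0, 0, 0, 0])

def Spec_make_amount (a : Int) (d : List Int) (q : List Int) (out : Int) : Prop := out = make_amount_alt a d q
instance (a : Int) (d : List Int) (q : List Int) (out : Int) : Decidable (Spec_make_amount a d q out) := by unfold Spec_make_amount; infer_instance

-- ===== CLAIM (what is proved, stated in full; the proofs are below) =====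
def Claim_equal_make_amount : Prop := ∀ (a : Int) (d : List Int) (q : List Int), Dom_make_amount a d q → Pre_make_amount a d q → Spec_make_amount a d q (make_amount a d q)

-- ===== LEMMAS AND PROOFS =====

-- A's inner loop computes the floor quotient and remainder, given enough fuel.
theorem aInner_eq (f : Nat) (a di total : Int) (hdi : 1 ≤ di) (ha : 0 ≤ a)
    (hf : (a / di).toNat ≤ f) :
    aInner f a di total = (a % di, total + a / di) := by
  induction f generalizing a total with
  | zero =>
    have hq : a / di = 0 := by
      have := Int.ediv_nonneg (b := di) ha (by omega)
      omega
    have hlt : a < di := by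
      by_contra h
      have : 1 ≤ a / di := Int.le_ediv_iff_mul_le (by omega) |>.mpr (by omega)
      omega
    simp [aInner, Int.emod_eq_of_lt ha hlt, hq]
  | succ f ih =>
    by_cases h : di ≤ a
    · have hq1 : 1 ≤ a / di := Int.le_ediv_iff_mul_le (by omega) |>.mpr (by omega)
      have hsub : (a - di) / di = a / di - 1 := by
        have := Int.add_mul_ediv_right a (-1) (c := di) (by omega)
        simpa [sub_eq_add_neg, neg_mul] using this
      have hmod : (a - di) % di = a % di := by
        simp
      rw [aInner, if_pos h, ih (a - di) (total + 1) (by omega) (by omega), hmod, hsub]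
      simp only [Prod.mk.injEq]
      exact ⟨trivial, by ring⟩
    · have hlt : a < di := by omega
      have hq : a / di = 0 := by
        have h1 := Int.ediv_nonneg (b := di) ha (by omega)
        have h2 : a / di < 1 := Int.ediv_lt_iff_lt_mul (by omega) |>.mpr (by omega)
        omega
      simp [aInner, h, Int.emod_eq_of_lt ha hlt, hq]

theorem bGo_nonpos (ds : List Int) (a total : Int) (ha : a ≤ 0) : bGo ds a total = total := by
  cases ds <;> simp [bGo, ha]

-- one step of B over a positive denomination is one mod/div step
theorem bGo_step (di : Int) (rest : List Int) (a total : Int) (hdi : 0 < di) (ha : 0 < a) :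
    bGo (di :: rest) a total = bGo rest (a % di) (total + a / di) := by
  have hfd : PySem.Int.floordiv a di = a / di := PySem.Int.floordiv_eq_ediv_of_pos hdi
  by_cases hn : a / di = 0
  · have hlt : a < di := by
      by_contra h
      have : 1 ≤ a / di := Int.le_ediv_iff_mul_le (by omega) |>.mpr (by omega)
      omega
    simp [bGo, show ¬ a ≤ 0 by omega, hfd, hn, Int.emod_eq_of_lt (by omega) hlt]
  · have : a - a / di * di = a % di := by rw [Int.emod_def]; ring
    simp [bGo, show ¬ a ≤ 0 by omega, hfd, hn, this]

-- the top k-prefix of d, take (k+1) splits off d[k] at the front after the reverse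
theorem take_drop_rev (d : List Int) (k m : Nat) (hk : k < d.length) (hm : m ≤ k) :
    ((d.take (k + 1)).drop m).reverse = d[k]! :: ((d.take k).drop m).reverse := by
  rw [List.take_add_one, List.getElem?_eq_getElem hk]
  rw [List.drop_append_of_le_length (by simp; omega)]
  simp [getElem!_pos d k hk]

-- Main correspondence: A's outer loop at index k-1 equals B's fold over the reversed
-- k-prefix, provided the greedy remainder reaches 0 within the positive suffix [m, k).
theorem outer_eq_bGo (k : Nat) (d : List Int) (f : Nat) (a total : Int)
    (hk : k ≤ d.length) (ha : 0 ≤ a)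
    (hterm : a = 0 ∨ (0 < a ∧ ∃ m, m < k ∧ (∀ j, m ≤ j → j < k → 0 < d[j]!) ∧
      gRem a (((d.take k).drop m).reverse) = 0))
    (hf : k ≤ f) :
    aOuter f a d ((k : Int) - 1) total = bGo ((d.take k).reverse) a total := by
  induction k generalizing f a total with
  | zero =>
    have ha0 : a = 0 := by rcases hterm with h | ⟨_, _, hm, _⟩; exact h; omega
    cases f with
    | zero => simp [aOuter, bGo]
    | succ f => simp [aOuter, ha0, bGo]
  | succ k ih =>
    obtain ⟨f, rfl⟩ : ∃ f', f = f' + 1 := ⟨f - 1, by omega⟩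
    by_cases ha0 : a = 0
    · rw [bGo_nonpos _ _ _ (by omega)]
      simp [aOuter, ha0]
    · have hapos : 0 < a := by omega
      obtain ⟨-, m, hm, hmpos, hrem⟩ := hterm.resolve_left ha0
      have hkd : k < d.length := by omega
      have hdk : 0 < d[k]! := hmpos k (by omega) (by omega)
      have hdkk : d[k]! = d[k] := getElem!_pos d k hkd
      have hget : PySem.List.pyGet? d ((k : Int) + 1 - 1) = some (d[k]'hkd) := by
        have : ((k : Int) + 1 - 1) = ((k : Nat) : Int) := by ring
        rw [this, PySem.List.pyGet?_natCast]
        simp [hkd]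
      have hquot : (a / (d[k]'hkd)).toNat ≤ a.toNat + 1 := by
        have h1 := Int.ediv_le_self (b := d[k]'hkd) (le_of_lt hapos)
        have h2 := Int.ediv_nonneg (le_of_lt hapos) (by omega : (0:Int) ≤ d[k]'hkd)
        omega
      have hstep := aInner_eq (a.toNat + 1) a (d[k]'hkd) total (by omega) (le_of_lt hapos) hquot
      have hrem' : gRem a (((d.take (k + 1)).drop m).reverse)
          = gRem (a % d[k]!) (((d.take k).drop m).reverse) := by
        rw [take_drop_rev d k m hkd (by omega)]
        rfl
      rw [hrem'] at hrem
      rw [aOuter, if_pos hapos]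
      push_cast
      rw [hget]
      simp only [hstep]
      have htake : (d.take (k + 1)).reverse = d[k]! :: (d.take k).reverse := by
        have := take_drop_rev d k 0 hkd (Nat.zero_le k)
        simpa using this
      rw [htake, bGo_step _ _ _ _ (by omega) hapos, hdkk]
      have hidx : ((k : Int) + 1 - 1 - 1) = ((k : Int) - 1) := by ring
      rw [hidx]
      have hrnn : 0 ≤ a % d[k] := Int.emod_nonneg a (by omega)
      apply ih f (a % d[k]) (total + a / d[k]) (by omega) hrnn _ (by omega)
      by_cases hz : a % d[k] = 0
      · exact Or.inl hz
      · right
        refine ⟨by omega, m, ?_, fun j hj1 hj2 => hmpos j hj1 (by omega), by rw [← hdkk] at hz ⊢; exact hrem⟩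
        rcases Nat.lt_succ_iff_lt_or_eq.mp hm with h | h
        · exact h
        · exfalso
          subst h
          have hnil : List.drop m (List.take m d) = [] := List.drop_eq_nil_of_le (by simp)
          rw [hnil] at hrem
          simp only [gRem, hdkk] at hrem
          exact hz hrem

-- ===== VERDICT (by name: the statement is the Claim_ definition above) =====
theorem make_amount_spec : Claim_equal_make_amount := by
  intro a d q _ hpre
  unfold Spec_make_amount make_amount make_amount_alt
  rcases hpre with ha | ⟨ha, k, hk, hpos, hrem, -⟩
  · rw [bGo_nonpos _ _ _ ha]
    cases d <;> simp [aOuter, show ¬ (0 < a) by omega]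
  · have := outer_eq_bGo d.length d (d.length + 1) a 0 (le_refl _) (le_of_lt ha)
      (Or.inr ⟨ha, k, hk, fun j hj1 hj2 => hpos j hj2 hj1, by simpa using hrem⟩) (by omega)
    simpa using this
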